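-- pv_equiv track=rewrite | github.com/WillKeWang/Wearable_Mental_Causal | compare_threshold.py | filter_relevant_edges
-- ===== SOURCE A (Python) =====
-- def find_ancestors(target_vars, edges):
--     """Find all ancestors (nodes with paths to target) in directed graph."""
--     ancestors = set(target_vars)
--     changed = True
--
--     while changed:
--         changed = False
--         for (source, target) in edges.keys():
--             if target in ancestors and source not in ancestors:
--                 ancestors.add(source)
--                 changed = True
--
--     return ancestors
--
-- def find_descendants(source_vars, edges):
--     """Find all descendants (nodes reachable from source) in directed graph."""
--     descendants = set(source_vars)
--     changed = True
--
--     while changed: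
--         changed = False
--         for (source, target) in edges.keys():
--             if source in descendants and target not in descendants:
--                 descendants.add(target)
--                 changed = True
--
--     return descendants
--
-- def filter_relevant_edges(edges, target_vars, threshold, direction='before'):
--     """Filter edges by threshold and relevance."""
--     filtered_edges = {k: v for k, v in edges.items() if v >= threshold}
--
--     if direction == 'before':
--         relevant_nodes = find_ancestors(target_vars, filtered_edges)
--     else:
--         relevant_nodes = find_descendants(target_vars, filtered_edges)
--
--     final_edges = {
--         (source, target): pct
--         for (source, target), pct in filtered_edges.items()
--         if source in relevant_nodes and target in relevant_nodes
--     }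
--
--     return final_edges
-- ===== SOURCE B (Python) =====
-- def filter_relevant_edges(edges, target_vars, threshold, direction='before'):
--     """Filter edges by threshold and relevance."""
--     filtered = {k: v for k, v in edges.items() if v >= threshold}
--
--     # orient each kept edge so that reachability always walks key -> value:
--     # 'before' needs ancestors, so walk edges backwards (target -> source)
--     if direction == 'before':
--         pairs = [(t, s) for (s, t) in filtered]
--     else:
--         pairs = [(s, t) for (s, t) in filtered]
--
--     adj = {}
--     for (k, v) in pairs:
--         adj.setdefault(k, []).append(v)
--
--     visited = set()
--     stack = list(target_vars)
--     while stack: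
--         x = stack.pop()
--         if x not in visited:
--             visited.add(x)
--             stack.extend(adj.get(x, []))
--
--     return {k: v for k, v in filtered.items()
--             if k[0] in visited and k[1] in visited}
-- ===== Notes on version B (the rewrite author's own statement) =====
-- stated objective: alternative
-- what changed: Replaces A's repeated full-edge-list fixpoint sweeps (find_ancestors/find_descendants rescan every edge until nothing changes) by building an adjacency dict once (reversed for 'before') and computing the reachable set with a single stack-based DFS, then filtering the kept edges by it.
import Mathlib
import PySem

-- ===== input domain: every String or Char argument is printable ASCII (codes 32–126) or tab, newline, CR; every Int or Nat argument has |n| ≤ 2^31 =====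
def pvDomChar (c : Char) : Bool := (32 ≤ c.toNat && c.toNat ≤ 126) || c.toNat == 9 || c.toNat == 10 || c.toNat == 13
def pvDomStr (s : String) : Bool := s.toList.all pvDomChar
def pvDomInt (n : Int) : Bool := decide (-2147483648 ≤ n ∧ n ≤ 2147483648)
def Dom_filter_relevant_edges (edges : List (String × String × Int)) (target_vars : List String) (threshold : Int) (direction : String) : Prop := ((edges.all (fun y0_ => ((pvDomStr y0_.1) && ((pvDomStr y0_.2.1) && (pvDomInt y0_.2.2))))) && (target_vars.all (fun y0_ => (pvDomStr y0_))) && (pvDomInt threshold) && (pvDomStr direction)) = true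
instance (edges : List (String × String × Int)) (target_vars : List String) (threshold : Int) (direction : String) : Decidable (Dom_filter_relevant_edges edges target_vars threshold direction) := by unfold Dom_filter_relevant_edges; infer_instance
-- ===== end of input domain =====

-- B replaces A's repeated whole-edge-list fixpoint sweeps by one stack-based DFS over an
-- adjacency dict (reversed for 'before'), computing the same reachable set.

-- boolean bridge for the membership tests both ports perform (cited by the loop termination proofs)
theorem and_not_contains_true {s : PySem.Set String} {a b : String}
    (h : (PySem.Set.contains s a && !PySem.Set.contains s b) = true) : a ∈ s ∧ b ∉ s := by
  simpa using h

-- ===== PORT A =====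
-- one 'for (source, target) in edges.keys()' sweep of find_ancestors' while-body
def findAncPass : List (String × String × Int) → PySem.Set String → Bool → PySem.Set String × Bool
  | [], anc, changed => (anc, changed)
  | e :: rest, anc, changed =>
    if PySem.Set.contains anc e.2.1 && !PySem.Set.contains anc e.1 then
      findAncPass rest (PySem.Set.add anc e.1) true
    else
      findAncPass rest anc changed

-- termination facts for the while-loops (cited by decreasing_by)
theorem findAncPass_subset (es : List (String × String × Int)) (anc : PySem.Set String) (c : Bool)
    {x : String} (hx : x ∈ anc) : x ∈ (findAncPass es anc c).1 := by
  induction es generalizing anc c with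
  | nil => exact hx
  | cons e rest ih =>
    simp only [findAncPass]
    split
    · exact ih _ _ ((PySem.Set.mem_add _ _ _).2 (Or.inl hx))
    · exact ih _ _ hx

theorem findAncPass_changed (es : List (String × String × Int)) (anc : PySem.Set String)
    (h : (findAncPass es anc false).2 = true) :
    ∃ e ∈ es, e.1 ∉ anc ∧ e.1 ∈ (findAncPass es anc false).1 := by
  induction es generalizing anc with
  | nil => simp [findAncPass] at h
  | cons e rest ih =>
    by_cases hc : (PySem.Set.contains anc e.2.1 && !PySem.Set.contains anc e.1) = true
    · refine ⟨e, List.mem_cons_self, (and_not_contains_true hc).2, ?_⟩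
      simp only [findAncPass, hc, if_pos]
      exact findAncPass_subset rest _ true ((PySem.Set.mem_add _ _ _).2 (Or.inr rfl))
    · simp only [findAncPass, hc, if_neg, Bool.false_eq_true, not_false_iff] at h ⊢
      obtain ⟨e', he', h1, h2⟩ := ih anc (by simpa [hc] using h)
      exact ⟨e', List.mem_cons_of_mem _ he', h1, by simpa [hc] using h2⟩

theorem countP_lt_of_subset (l : List String) (s s' : PySem.Set String)
    (hsub : ∀ y ∈ s, y ∈ s') {x : String} (hx : x ∈ l) (hxs : x ∉ s) (hxs' : x ∈ s') :
    l.countP (fun y => !PySem.Set.contains s' y) < l.countP (fun y => !PySem.Set.contains s y) := by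
  induction l with
  | nil => simp at hx
  | cons a t ih =>
    have hmono : t.countP (fun y => !PySem.Set.contains s' y) ≤ t.countP (fun y => !PySem.Set.contains s y) := by
      refine List.countP_mono_left (fun b _ hb => ?_)
      simp only [Bool.not_eq_eq_eq_not, Bool.not_true] at hb ⊢
      simp only [PySem.Set.contains_eq_listContains] at hb ⊢
      simp at hb ⊢
      exact fun hbs => hb (hsub b hbs)
    rcases List.mem_cons.1 hx with rfl | hat
    · have e1 : List.countP (fun y => !PySem.Set.contains s' y) (x :: t)
          = List.countP (fun y => !PySem.Set.contains s' y) t := by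
        simp [hxs']
      have e2 : List.countP (fun y => !PySem.Set.contains s y) (x :: t)
          = List.countP (fun y => !PySem.Set.contains s y) t + 1 := by
        simp [hxs]
      rw [e1, e2]
      omega
    · by_cases hA : a ∈ s
      · have e1 : List.countP (fun y => !PySem.Set.contains s' y) (a :: t)
            = List.countP (fun y => !PySem.Set.contains s' y) t := by
          simp [hsub a hA]
        have e2 : List.countP (fun y => !PySem.Set.contains s y) (a :: t)
            = List.countP (fun y => !PySem.Set.contains s y) t := by
          simp [hA]
        rw [e1, e2]
        exact ih hat
      · have e2 : List.countP (fun y => !PySem.Set.contains s y) (a :: t)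
            = List.countP (fun y => !PySem.Set.contains s y) t + 1 := by
          simp [hA]
        have e1 : List.countP (fun y => !PySem.Set.contains s' y) (a :: t)
            ≤ List.countP (fun y => !PySem.Set.contains s' y) t + 1 := by
          rw [List.countP_cons]
          split <;> omega
        have hlt := ih hat
        rw [e2]
        omega

-- 'while changed:' of find_ancestors
def findAncLoop (es : List (String × String × Int)) (anc : PySem.Set String) : PySem.Set String :=
  let r := findAncPass es anc false
  if h : r.2 = true then findAncLoop es r.1 else r.1
termination_by (es.map (fun e => e.1)).countP (fun y => !PySem.Set.contains anc y)
decreasing_by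
  obtain ⟨e, he, h1, h2⟩ := findAncPass_changed es anc h
  exact countP_lt_of_subset _ _ _ (fun y hy => findAncPass_subset es anc false hy)
    (List.mem_map_of_mem he) h1 h2

def find_ancestors (target_vars : List String) (es : List (String × String × Int)) : PySem.Set String :=
  findAncLoop es (PySem.Set.ofList target_vars)

-- one sweep of find_descendants' while-body
def findDescPass : List (String × String × Int) → PySem.Set String → Bool → PySem.Set String × Bool
  | [], des, changed => (des, changed)
  | e :: rest, des, changed =>
    if PySem.Set.contains des e.1 && !PySem.Set.contains des e.2.1 then
      findDescPass rest (PySem.Set.add des e.2.1) true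
    else
      findDescPass rest des changed

-- swapping source/target turns the descendants sweep into the ancestors sweep
def swapEs (es : List (String × String × Int)) : List (String × String × Int) :=
  es.map (fun e => (e.2.1, e.1, e.2.2))

theorem findDescPass_eq (es : List (String × String × Int)) (des : PySem.Set String) (c : Bool) :
    findDescPass es des c = findAncPass (swapEs es) des c := by
  induction es generalizing des c with
  | nil => rfl
  | cons e rest ih =>
    have hsw : swapEs (e :: rest) = (e.2.1, e.1, e.2.2) :: swapEs rest := rfl
    rw [hsw]
    by_cases hc : (PySem.Set.contains des e.1 && !PySem.Set.contains des e.2.1) = true <;>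
      simp only [findDescPass, findAncPass, hc, if_pos, if_neg, Bool.false_eq_true,
        not_false_iff] <;>
      exact ih _ _

-- 'while changed:' of find_descendants
def findDescLoop (es : List (String × String × Int)) (des : PySem.Set String) : PySem.Set String :=
  let r := findDescPass es des false
  if h : r.2 = true then findDescLoop es r.1 else r.1
termination_by (es.map (fun e => e.2.1)).countP (fun y => !PySem.Set.contains des y)
decreasing_by
  have h' : (findAncPass (swapEs es) des false).2 = true := by
    rw [← findDescPass_eq]; exact h
  obtain ⟨e, he, h1, h2⟩ := findAncPass_changed (swapEs es) des h'
  refine countP_lt_of_subset _ des _ (fun y hy => ?_) ?_ h1 ?_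
  · show y ∈ (findDescPass es des false).1
    rw [findDescPass_eq]
    exact findAncPass_subset _ _ _ hy
  · simp only [swapEs, List.mem_map] at he
    obtain ⟨e', he', rfl⟩ := he
    exact List.mem_map_of_mem he'
  · show e.1 ∈ (findDescPass es des false).1
    rw [findDescPass_eq]
    exact h2

def find_descendants (source_vars : List String) (es : List (String × String × Int)) : PySem.Set String :=
  findDescLoop es (PySem.Set.ofList source_vars)

def filter_relevant_edges (edges : List (String × String × Int)) (target_vars : List String) (threshold : Int) (direction : String) : List (String × String × Int) :=
  let filtered := edges.filter (fun e => decide (threshold ≤ e.2.2))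
  let relevant_nodes :=
    if direction == "before" then find_ancestors target_vars filtered
    else find_descendants target_vars filtered
  filtered.filter (fun e => PySem.Set.contains relevant_nodes e.1 && PySem.Set.contains relevant_nodes e.2.1)

-- ===== PORT B =====
-- adj.setdefault(k, []).append(v) loop over the oriented pairs
def buildAdj (ps : List (String × String)) : PySem.Dict String (List String) :=
  ps.foldl (fun d p => d.modify p.1 [] (fun l => l ++ [p.2])) PySem.Dict.empty

theorem buildAdj_getD (ps : List (String × String)) (k : String) :
    (buildAdj ps).getD k [] = (ps.filter (fun p => p.1 == k)).map (fun p => p.2) := by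
  simpa using PySem.Dict.getD_foldl_modify_append ps PySem.Dict.empty k

-- the 'while stack:' DFS; the Lean stack keeps the TOP at the HEAD (Python pops from the
-- end), so stack.extend(lst) becomes lst.reverse ++ rest.  U and the two membership
-- hypotheses exist only for termination (every node entering the stack lies in U).
def dfs (adj : PySem.Dict String (List String)) (U : List String)
    (hadj : ∀ k y, y ∈ adj.getD k [] → y ∈ U)
    (visited : PySem.Set String) (stack : List String)
    (hstk : ∀ y ∈ stack, y ∈ U) : PySem.Set String :=
  match stack with
  | [] => visited
  | x :: rest =>
    if hv : PySem.Set.contains visited x = true then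
      dfs adj U hadj visited rest (fun y hy => hstk y (List.mem_cons_of_mem _ hy))
    else
      dfs adj U hadj (PySem.Set.add visited x) ((adj.getD x []).reverse ++ rest)
        (fun y hy => by
          rcases List.mem_append.1 hy with h | h
          · exact hadj x y (List.mem_reverse.1 h)
          · exact hstk y (List.mem_cons_of_mem _ h))
termination_by (U.countP (fun y => !PySem.Set.contains visited y), stack.length)
decreasing_by
  · exact Prod.Lex.right _ (by simp)
  · apply Prod.Lex.left
    exact countP_lt_of_subset U visited _ (fun y hy => (PySem.Set.mem_add _ _ _).2 (Or.inl hy))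
      (hstk x List.mem_cons_self)
      (fun hmem => hv ((PySem.Set.contains_iff _ _).2 hmem))
      ((PySem.Set.mem_add _ _ _).2 (Or.inr rfl))

def filter_relevant_edges_alt (edges : List (String × String × Int)) (target_vars : List String) (threshold : Int) (direction : String) : List (String × String × Int) :=
  let filtered := edges.filter (fun e => decide (threshold ≤ e.2.2))
  let ps := if direction == "before" then filtered.map (fun e => (e.2.1, e.1))
            else filtered.map (fun e => (e.1, e.2.1))
  let visited := dfs (buildAdj ps) (target_vars ++ ps.map (fun p => p.2))
    (fun k y hy => by
      rw [buildAdj_getD] at hy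
      rcases List.mem_map.1 hy with ⟨p, hp, rfl⟩
      exact List.mem_append.2 (Or.inr (List.mem_map_of_mem (List.mem_of_mem_filter hp))))
    PySem.Set.empty target_vars.reverse
    (fun y hy => List.mem_append.2 (Or.inl (List.mem_reverse.1 hy)))
  filtered.filter (fun e => PySem.Set.contains visited e.1 && PySem.Set.contains visited e.2.1)

-- ===== PRECONDITION & SPEC =====
def Spec_filter_relevant_edges (edges : List (String × String × Int)) (target_vars : List String) (threshold : Int) (direction : String) (out : List (String × String × Int)) : Prop := out = filter_relevant_edges_alt edges target_vars threshold direction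
instance (edges : List (String × String × Int)) (target_vars : List String) (threshold : Int) (direction : String) (out : List (String × String × Int)) : Decidable (Spec_filter_relevant_edges edges target_vars threshold direction out) := by unfold Spec_filter_relevant_edges; infer_instance

-- ===== CLAIM (what is proved, stated in full; the proofs are below) =====
def Claim_equal_filter_relevant_edges : Prop := ∀ (edges : List (String × String × Int)) (target_vars : List String) (threshold : Int) (direction : String), Dom_filter_relevant_edges edges target_vars threshold direction → Spec_filter_relevant_edges edges target_vars threshold direction (filter_relevant_edges edges target_vars threshold direction)

-- ===== LEMMAS AND PROOFS =====

theorem findAncPass_true (es : List (String × String × Int)) (anc : PySem.Set String) :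
    (findAncPass es anc true).2 = true := by
  induction es generalizing anc with
  | nil => rfl
  | cons e rest ih => simp only [findAncPass]; split <;> exact ih _

theorem and_not_contains_of {s : PySem.Set String} {a b : String}
    (h1 : a ∈ s) (h2 : b ∉ s) : (PySem.Set.contains s a && !PySem.Set.contains s b) = true := by
  simp [h1, h2]

-- x is reachable: x is a target, or some oriented pair leads from a reachable node to x
inductive Reach (ps : List (String × String)) (T : List String) : String → Prop
  | base {x : String} : x ∈ T → Reach ps T x
  | step {a b : String} : Reach ps T a → (a, b) ∈ ps → Reach ps T b

theorem findAncPass_sound (ps : List (String × String)) (T : List String)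
    (es : List (String × String × Int)) (anc : PySem.Set String) (c : Bool)
    (hes : ∀ e ∈ es, ((e.2.1 : String), (e.1 : String)) ∈ ps)
    (hanc : ∀ y ∈ anc, Reach ps T y) :
    ∀ x ∈ (findAncPass es anc c).1, Reach ps T x := by
  induction es generalizing anc c with
  | nil => exact hanc
  | cons e rest ih =>
    simp only [findAncPass]
    split
    · rename_i hcond
      refine ih _ _ (fun e' he' => hes e' (List.mem_cons_of_mem _ he')) (fun y hy => ?_)
      rcases (PySem.Set.mem_add _ _ _).1 hy with h | rfl
      · exact hanc y h
      · exact Reach.step (hanc _ (and_not_contains_true hcond).1) (hes e List.mem_cons_self)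
    · exact ih _ _ (fun e' he' => hes e' (List.mem_cons_of_mem _ he')) hanc

theorem findAncPass_fix (es : List (String × String × Int)) (anc : PySem.Set String)
    (h : (findAncPass es anc false).2 = false) :
    (findAncPass es anc false).1 = anc ∧ ∀ e ∈ es, e.2.1 ∈ anc → e.1 ∈ anc := by
  induction es generalizing anc with
  | nil => exact ⟨rfl, by simp⟩
  | cons e rest ih =>
    by_cases hc : (PySem.Set.contains anc e.2.1 && !PySem.Set.contains anc e.1) = true
    · exfalso
      simp only [findAncPass, hc, if_pos] at h
      rw [findAncPass_true] at h
      exact Bool.true_eq_false.mp h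
    · simp only [findAncPass, hc, if_neg, Bool.false_eq_true, not_false_iff] at h ⊢
      obtain ⟨h1, h2⟩ := ih anc (by simpa [hc] using h)
      refine ⟨by simpa [hc] using h1, fun e' he' ht => ?_⟩
      rcases List.mem_cons.1 he' with rfl | hmem
      · by_contra hs
        exact hc (and_not_contains_of ht hs)
      · exact h2 e' hmem ht

theorem findAncLoop_subset (es : List (String × String × Int)) (anc : PySem.Set String)
    {x : String} (hx : x ∈ anc) : x ∈ findAncLoop es anc := by
  induction anc using findAncLoop.induct es with
  | case1 anc r hr ih =>
    rw [findAncLoop, dif_pos (show (findAncPass es anc false).2 = true from hr)]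
    exact ih (findAncPass_subset es anc false hx)
  | case2 anc r hr =>
    rw [findAncLoop, dif_neg (show ¬ (findAncPass es anc false).2 = true from hr)]
    exact findAncPass_subset es anc false hx

theorem findAncLoop_sound (ps : List (String × String)) (T : List String)
    (es : List (String × String × Int)) (anc : PySem.Set String)
    (hes : ∀ e ∈ es, ((e.2.1 : String), (e.1 : String)) ∈ ps)
    (hanc : ∀ y ∈ anc, Reach ps T y) :
    ∀ x ∈ findAncLoop es anc, Reach ps T x := by
  induction anc using findAncLoop.induct es with
  | case1 anc r hr ih =>
    rw [findAncLoop, dif_pos (show (findAncPass es anc false).2 = true from hr)]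
    exact ih (findAncPass_sound ps T es anc false hes hanc)
  | case2 anc r hr =>
    rw [findAncLoop, dif_neg (show ¬ (findAncPass es anc false).2 = true from hr)]
    exact findAncPass_sound ps T es anc false hes hanc

theorem findAncLoop_closed (es : List (String × String × Int)) (anc : PySem.Set String) :
    ∀ e ∈ es, e.2.1 ∈ findAncLoop es anc → e.1 ∈ findAncLoop es anc := by
  induction anc using findAncLoop.induct es with
  | case1 anc r hr ih =>
    rw [findAncLoop, dif_pos (show (findAncPass es anc false).2 = true from hr)]
    exact ih
  | case2 anc r hr =>
    rw [findAncLoop, dif_neg (show ¬ (findAncPass es anc false).2 = true from hr)]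
    intro e he ht
    obtain ⟨h1, h2⟩ := findAncPass_fix es anc (by
      cases hpp : (findAncPass es anc false).2
      · rfl
      · exact absurd hpp (show ¬ (findAncPass es anc false).2 = true from hr))
    rw [h1] at ht ⊢
    exact h2 e he ht

theorem mem_findAncLoop_iff (es : List (String × String × Int)) (T : List String) (x : String) :
    x ∈ findAncLoop es (PySem.Set.ofList T) ↔ Reach (es.map (fun e => (e.2.1, e.1))) T x := by
  constructor
  · exact fun h => findAncLoop_sound _ T es _ (fun e he => List.mem_map_of_mem he)
      (fun y hy => Reach.base ((PySem.Set.mem_ofList _ _).1 hy)) x h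
  · intro h
    induction h with
    | base hx => exact findAncLoop_subset es _ ((PySem.Set.mem_ofList _ _).2 hx)
    | step _ hp ih =>
      rcases List.mem_map.1 hp with ⟨e, he, heq⟩
      injection heq with h1 h2
      exact h2 ▸ findAncLoop_closed es _ e he (h1 ▸ ih)

theorem findDescLoop_eq (es : List (String × String × Int)) (des : PySem.Set String) :
    findDescLoop es des = findAncLoop (swapEs es) des := by
  induction des using findDescLoop.induct es with
  | case1 des r hr ih =>
    have hd : (findDescPass es des false).2 = true := hr
    have ha : (findAncPass (swapEs es) des false).2 = true := by
      rw [← findDescPass_eq]; exact hd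
    rw [findDescLoop, findAncLoop, dif_pos hd, dif_pos ha, ← findDescPass_eq]
    exact ih
  | case2 des r hr =>
    have hd : ¬ (findDescPass es des false).2 = true := hr
    have ha : ¬ (findAncPass (swapEs es) des false).2 = true := by
      rw [← findDescPass_eq]; exact hd
    rw [findDescLoop, findAncLoop, dif_neg hd, dif_neg ha, ← findDescPass_eq]

theorem mem_findDescLoop_iff (es : List (String × String × Int)) (T : List String) (x : String) :
    x ∈ findDescLoop es (PySem.Set.ofList T) ↔ Reach (es.map (fun e => (e.1, e.2.1))) T x := by
  rw [findDescLoop_eq, mem_findAncLoop_iff]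
  have heq : (swapEs es).map (fun e => (e.2.1, e.1)) = es.map (fun e => (e.1, e.2.1)) := by
    simp [swapEs]
  rw [heq]

theorem dfs_supset (adj : PySem.Dict String (List String)) (U : List String)
    (hadj : ∀ k y, y ∈ adj.getD k [] → y ∈ U)
    (visited : PySem.Set String) (stack : List String) (hstk : ∀ y ∈ stack, y ∈ U) :
    ∀ y, (y ∈ visited ∨ y ∈ stack) → y ∈ dfs adj U hadj visited stack hstk := by
  induction visited, stack, hstk using dfs.induct adj U hadj with
  | case1 visited hstk _ =>
    rw [dfs]
    rintro y (hy | hy)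
    · exact hy
    · simp at hy
  | case2 visited x rest hstk hv _ ih =>
    rw [dfs]
    simp only [hv, dite_true]
    rintro y (hy | hy)
    · exact ih y (Or.inl hy)
    · rcases List.mem_cons.1 hy with rfl | hy
      · exact ih y (Or.inl ((PySem.Set.contains_iff _ _).1 hv))
      · exact ih y (Or.inr hy)
  | case3 visited x rest hstk hv _ ih =>
    rw [dfs]
    simp only [hv]
    rintro y (hy | hy)
    · exact ih y (Or.inl ((PySem.Set.mem_add _ _ _).2 (Or.inl hy)))
    · rcases List.mem_cons.1 hy with rfl | hy
      · exact ih y (Or.inl ((PySem.Set.mem_add _ _ _).2 (Or.inr rfl)))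
      · exact ih y (Or.inr (List.mem_append.2 (Or.inr hy)))

theorem dfs_sound (ps : List (String × String)) (T : List String)
    (adj : PySem.Dict String (List String)) (U : List String)
    (hadj : ∀ k y, y ∈ adj.getD k [] → y ∈ U)
    (visited : PySem.Set String) (stack : List String) (hstk : ∀ y ∈ stack, y ∈ U)
    (hR : ∀ a b, Reach ps T a → b ∈ adj.getD a [] → Reach ps T b)
    (hvis : ∀ y ∈ visited, Reach ps T y) (hstkR : ∀ y ∈ stack, Reach ps T y) :
    ∀ x ∈ dfs adj U hadj visited stack hstk, Reach ps T x := by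
  induction visited, stack, hstk using dfs.induct adj U hadj with
  | case1 visited hstk _ =>
    rw [dfs]; exact hvis
  | case2 visited x rest hstk hv _ ih =>
    rw [dfs]
    simp only [hv, dite_true]
    exact ih hvis (fun y hy => hstkR y (List.mem_cons_of_mem _ hy))
  | case3 visited x rest hstk hv _ ih =>
    rw [dfs]
    simp only [hv]
    have hx : Reach ps T x := hstkR x List.mem_cons_self
    refine ih (fun y hy => ?_) (fun y hy => ?_)
    · rcases (PySem.Set.mem_add _ _ _).1 hy with h | rfl
      · exact hvis y h
      · exact hx
    · rcases List.mem_append.1 hy with h | h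
      · exact hR x y hx (List.mem_reverse.1 h)
      · exact hstkR y (List.mem_cons_of_mem _ h)

theorem dfs_closed (adj : PySem.Dict String (List String)) (U : List String)
    (hadj : ∀ k y, y ∈ adj.getD k [] → y ∈ U)
    (visited : PySem.Set String) (stack : List String) (hstk : ∀ y ∈ stack, y ∈ U)
    (hinv : ∀ t ∈ visited, ∀ b ∈ adj.getD t [], b ∈ visited ∨ b ∈ stack) :
    ∀ t ∈ dfs adj U hadj visited stack hstk, ∀ b ∈ adj.getD t [],
      b ∈ dfs adj U hadj visited stack hstk := by
  induction visited, stack, hstk using dfs.induct adj U hadj with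
  | case1 visited hstk _ =>
    rw [dfs]
    intro t ht b hb
    rcases hinv t ht b hb with h | h
    · exact h
    · simp at h
  | case2 visited x rest hstk hv _ ih =>
    rw [dfs]
    simp only [hv, dite_true]
    refine ih (fun t ht b hb => ?_)
    rcases hinv t ht b hb with h | h
    · exact Or.inl h
    · rcases List.mem_cons.1 h with rfl | h
      · exact Or.inl ((PySem.Set.contains_iff _ _).1 hv)
      · exact Or.inr h
  | case3 visited x rest hstk hv _ ih =>
    rw [dfs]
    simp only [hv]
    refine ih (fun t ht b hb => ?_)
    rcases (PySem.Set.mem_add _ _ _).1 ht with ht' | rfl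
    · rcases hinv t ht' b hb with h | h
      · exact Or.inl ((PySem.Set.mem_add _ _ _).2 (Or.inl h))
      · rcases List.mem_cons.1 h with rfl | h
        · exact Or.inl ((PySem.Set.mem_add _ _ _).2 (Or.inr rfl))
        · exact Or.inr (List.mem_append.2 (Or.inr h))
    · exact Or.inr (List.mem_append.2 (Or.inl (List.mem_reverse.2 hb)))

theorem mem_dfs_iff (ps : List (String × String)) (T U : List String) (h1) (h2) (x : String) :
    x ∈ dfs (buildAdj ps) U h1 PySem.Set.empty T.reverse h2 ↔ Reach ps T x := by
  constructor
  · refine dfs_sound ps T _ U h1 _ _ h2 (fun a b ha hb => ?_) (by simp [PySem.Set.empty])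
      (fun y hy => Reach.base (List.mem_reverse.1 hy)) x
    rw [buildAdj_getD] at hb
    rcases List.mem_map.1 hb with ⟨p, hp, rfl⟩
    have hp' := List.mem_of_mem_filter hp
    have hpk : p.1 = a := by simpa using List.of_mem_filter hp
    have : (a, p.2) ∈ ps := by rw [← hpk]; simpa using hp'
    exact Reach.step ha this
  · intro h
    induction h with
    | base hx => exact dfs_supset _ U h1 _ _ h2 _ (Or.inr (List.mem_reverse.2 hx))
    | @step a b _ hp ih =>
      refine dfs_closed _ U h1 _ _ h2 (by simp [PySem.Set.empty]) _ ih _ ?_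
      rw [buildAdj_getD]
      exact List.mem_map.2 ⟨(a, b), List.mem_filter.2 ⟨hp, by simp⟩, rfl⟩

theorem contains_pair_congr (s t : PySem.Set String)
    (h : ∀ y, y ∈ s ↔ y ∈ t) (a b : String) :
    (PySem.Set.contains s a && PySem.Set.contains s b)
      = (PySem.Set.contains t a && PySem.Set.contains t b) := by
  have hc : ∀ x, PySem.Set.contains s x = PySem.Set.contains t x := by
    intro x
    simp only [PySem.Set.contains_eq_listContains]
    simp [h x]
  rw [hc a, hc b]

-- ===== VERDICT (by name: the statement is the Claim_ definition above) =====
theorem filter_relevant_edges_spec : Claim_equal_filter_relevant_edges := by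
  intro edges target_vars threshold direction _
  unfold Spec_filter_relevant_edges filter_relevant_edges filter_relevant_edges_alt
  by_cases hdir : (direction == "before") = true
  · simp only [hdir, if_true]
    refine List.filter_congr fun e _ => ?_
    refine contains_pair_congr _ _ (fun y => ?_) e.1 e.2.1
    rw [find_ancestors, mem_findAncLoop_iff, mem_dfs_iff]
  · simp only [hdir, Bool.false_eq_true, if_false]
    refine List.filter_congr fun e _ => ?_
    refine contains_pair_congr _ _ (fun y => ?_) e.1 e.2.1
    rw [find_descendants, mem_findDescLoop_iff, mem_dfs_iff]
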